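-- pv_equiv track=rewrite | github.com/zhuliangzzz/zl_repository | sh_script/test/锣刀排序/snake_rout.py | snake_sort
-- ===== SOURCE A (Python) =====
-- def snake_sort(coordinates):
--     if not coordinates:
--         return []
--
--     # 1. 按y坐标分组
--     y_groups = {}
--     for x, y in coordinates:
--         y_groups.setdefault(y, []).append(x)
--
--     # 2. 对y坐标排序
--     sorted_y = sorted(y_groups.keys())
--
--     # 3. 按S型路径排序
--     result = []
--     for i, y in enumerate(sorted_y):
--         x_coords = y_groups[y]
--         # 偶数行从左到右，奇数行从右到左
--         if i % 2 == 0: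
--             x_coords.sort()
--         else:
--             x_coords.sort(reverse=True)
--
--         # 将排序后的坐标加入结果
--         for x in x_coords:
--             result.append((x, y))
--
--     return result
-- ===== SOURCE B (Python) =====
-- def snake_sort(coordinates):
--     pts = sorted(((x, y) for x, y in coordinates), key=lambda p: (p[1], p[0]))
--     result = []
--     i = 0
--     row = 0
--     n = len(pts)
--     while i < n:
--         j = i
--         y = pts[i][1]
--         while j < n and pts[j][1] == y:
--             j += 1
--         block = pts[i:j]
--         if row % 2 == 1:
--             block.reverse()
--         result += block
--         row += 1
--         i = j
--     return result
-- ===== Notes on version B (the rewrite author's own statement) =====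
-- stated objective: alternative
-- what changed: Replaces A's dict-grouping plus a separate sort of each row with one global sort by (y, x) followed by a single scan that splits consecutive equal-y runs and reverses every other run.
import Mathlib
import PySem

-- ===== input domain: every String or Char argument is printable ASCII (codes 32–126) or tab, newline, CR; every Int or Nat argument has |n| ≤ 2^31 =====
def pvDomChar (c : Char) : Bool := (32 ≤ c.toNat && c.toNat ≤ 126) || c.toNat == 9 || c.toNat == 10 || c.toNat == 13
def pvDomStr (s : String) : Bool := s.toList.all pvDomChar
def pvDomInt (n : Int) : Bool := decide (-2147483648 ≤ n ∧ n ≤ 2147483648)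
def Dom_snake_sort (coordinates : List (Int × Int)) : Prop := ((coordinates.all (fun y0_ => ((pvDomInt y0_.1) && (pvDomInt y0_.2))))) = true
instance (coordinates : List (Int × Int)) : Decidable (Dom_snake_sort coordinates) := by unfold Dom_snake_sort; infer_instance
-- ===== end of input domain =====

-- B replaces A's dict-grouping + per-row sorts with one global sort by (y, x) and a single
-- run-splitting scan that reverses every other run (objective: alternative decomposition).

-- ===== PORT A =====
-- literal transliteration of A: group the x's by y in an insertion-ordered dict,
-- sort the keys, then per row sort ascending (even row) or descending (odd row).
def snake_sort (coordinates : List (Int × Int)) : List (Int × Int) :=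
  if coordinates = [] then []
  else
    let y_groups : PySem.Dict Int (List Int) :=
      coordinates.foldl (fun d p => d.modify p.2 [] (fun xs => xs ++ [p.1])) PySem.Dict.empty
    let sorted_y := PySem.List.sorted (PySem.Dict.keys y_groups) (fun y => y) false
    (PySem.List.enumerate sorted_y 0).foldl
      (fun result iy =>
        let x_coords := PySem.Dict.getD y_groups iy.2 []
        let x_coords' := if iy.1 % 2 == 0
          then PySem.List.sorted x_coords (fun x => x) false
          else PySem.List.sorted x_coords (fun x => x) true
        result ++ x_coords'.map (fun x => (x, iy.2))) []

-- ===== PORT B =====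
-- transliteration of B's while loop: split the (y, x)-sorted list into maximal
-- equal-y runs, reversing the run at every odd row index.
def snakeBlocks (r : Nat) (pts : List (Int × Int)) : List (Int × Int) :=
  match pts with
  | [] => []
  | p :: rest =>
    let block := p :: rest.takeWhile (fun q => q.2 == p.2)
    let tail := rest.dropWhile (fun q => q.2 == p.2)
    (if r % 2 == 1 then block.reverse else block) ++ snakeBlocks (r + 1) tail
termination_by pts.length
decreasing_by
  simp only [List.length_cons]
  exact Nat.lt_succ_of_le (List.length_dropWhile_le _ _)

def snake_sort_alt (coordinates : List (Int × Int)) : List (Int × Int) :=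
  snakeBlocks 0 (PySem.List.sorted2 coordinates (fun p => p.2) (fun p => p.1) false)

-- ===== PRECONDITION & SPEC =====
def Spec_snake_sort (coordinates : List (Int × Int)) (out : List (Int × Int)) : Prop := out = snake_sort_alt coordinates
instance (coordinates : List (Int × Int)) (out : List (Int × Int)) : Decidable (Spec_snake_sort coordinates out) := by unfold Spec_snake_sort; infer_instance

-- ===== CLAIM (what is proved, stated in full; the proofs are below) =====
def Claim_equal_snake_sort : Prop := ∀ (coordinates : List (Int × Int)), Dom_snake_sort coordinates → Spec_snake_sort coordinates (snake_sort coordinates)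

-- ===== LEMMAS AND PROOFS =====

-- Python's tuple key (y, x), as a lexicographic order
def keyLex (p : Int × Int) : Int ×ₗ Int := toLex (p.2, p.1)

-- the comparison sorted2 uses for key (p.2, p.1)
def beforeLex (a b : Int × Int) : Bool :=
  decide (a.2 < b.2) || (!decide (b.2 < a.2) && decide (a.1 < b.1))

-- the sorted distinct y's
def rowsOf (l : List (Int × Int)) : List Int :=
  PySem.List.sorted (PySem.Set.ofList (l.map (fun p => p.2))) (fun y => y) false

-- row y, ascending by x
def rowList (l : List (Int × Int)) (y : Int) : List (Int × Int) :=
  (PySem.List.sorted ((l.filter (fun p => p.2 == y)).map (fun p => p.1)) (fun x => x) false).map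
    (fun x => (x, y))

-- common normal form of both programs: rows in order, odd rows reversed
def snakeRows (r : Nat) (rows : List Int) (f : Int → List (Int × Int)) : List (Int × Int) :=
  match rows with
  | [] => []
  | y :: t => (if r % 2 == 1 then (f y).reverse else f y) ++ snakeRows (r + 1) t f

theorem sorted_rev_eq_reverse (xs : List Int) :
    PySem.List.sorted xs (fun x => x) true = (PySem.List.sorted xs (fun x => x) false).reverse := by
  apply PySem.List.eq_of_perm_of_pairwise_le_of_injective (fun x : Int => -x)
    (fun a b h => neg_inj.mp h)
  · exact (PySem.List.sorted_perm xs _ true).trans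
      ((PySem.List.sorted_perm xs _ false).symm.trans (List.reverse_perm _).symm)
  · have := PySem.List.sorted_pairwise_rev xs (fun x => x)
    exact this.imp (by intro a b h; omega)
  · rw [List.pairwise_reverse]
    have := PySem.List.sorted_pairwise xs (fun x => x)
    exact this.imp (by intro a b h; omega)

theorem beforeLex_iff (a b : Int × Int) : beforeLex a b = true ↔ keyLex a < keyLex b := by
  simp [beforeLex, keyLex, Prod.Lex.toLex_lt_toLex]
  omega

theorem beforeLex_false_iff (a b : Int × Int) : beforeLex a b = false ↔ keyLex b ≤ keyLex a := by
  rw [← Bool.not_eq_true, beforeLex_iff, not_lt]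

theorem pairwise_insertBy (x : Int × Int) (l : List (Int × Int))
    (h : l.Pairwise (fun a b => keyLex a ≤ keyLex b)) :
    (PySem.List.insertBy beforeLex x l).Pairwise (fun a b => keyLex a ≤ keyLex b) := by
  induction l with
  | nil => simp [PySem.List.insertBy]
  | cons y ys ih =>
    rw [List.pairwise_cons] at h
    by_cases hb : beforeLex x y = true
    · rw [show PySem.List.insertBy beforeLex x (y :: ys) = x :: y :: ys from by
        simp [PySem.List.insertBy, hb]]
      have hxy : keyLex x < keyLex y := (beforeLex_iff x y).mp hb
      refine List.Pairwise.cons ?_ (List.Pairwise.cons h.1 h.2)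
      intro z hz
      rcases List.mem_cons.mp hz with rfl | hz
      · exact le_of_lt hxy
      · exact le_of_lt (lt_of_lt_of_le hxy (h.1 z hz))
    · rw [show PySem.List.insertBy beforeLex x (y :: ys) = y :: PySem.List.insertBy beforeLex x ys from by
        simp [PySem.List.insertBy, hb]]
      refine List.Pairwise.cons ?_ (ih h.2)
      intro z hz
      rw [PySem.List.mem_insertBy] at hz
      rcases hz with rfl | hz
      · exact (beforeLex_false_iff _ _).mp (Bool.eq_false_iff.mpr hb)
      · exact h.1 z hz

theorem pairwise_sorted2_lex (l : List (Int × Int)) :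
    (PySem.List.sorted2 l (fun p => p.2) (fun p => p.1) false).Pairwise
      (fun p q => keyLex p ≤ keyLex q) := by
  have key : ∀ acc, acc.Pairwise (fun a b : Int × Int => keyLex a ≤ keyLex b) →
      (l.foldl (fun acc x => PySem.List.insertBy beforeLex x acc) acc).Pairwise
        (fun a b => keyLex a ≤ keyLex b) := by
    induction l with
    | nil => intro acc h; exact h
    | cons p t ih => intro acc h; exact ih _ (pairwise_insertBy p acc h)
  have heq : PySem.List.sorted2 l (fun p => p.2) (fun p => p.1) false =
      l.foldl (fun acc x => PySem.List.insertBy beforeLex x acc) [] := rfl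
  rw [heq]
  exact key [] (by simp)

theorem keyLex_injective : Function.Injective keyLex := by
  intro a b h
  simp [keyLex, Prod.ext_iff] at h ⊢
  omega

theorem snd_of_mem_rowList {l : List (Int × Int)} {y : Int} {p : Int × Int}
    (h : p ∈ rowList l y) : p.2 = y := by
  rcases List.mem_map.mp h with ⟨x, _, rfl⟩
  rfl

theorem rowList_perm_filter (l : List (Int × Int)) (y : Int) :
    (rowList l y).Perm (l.filter (fun p => p.2 == y)) := by
  have h1 : (rowList l y).Perm
      (((l.filter (fun p => p.2 == y)).map (fun p => p.1)).map (fun x => (x, y))) :=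
    (PySem.List.sorted_perm _ _ _).map _
  rw [List.map_map] at h1
  have h2 : (l.filter (fun p => p.2 == y)).map ((fun x => (x, y)) ∘ (fun p => p.1)) =
      l.filter (fun p => p.2 == y) := by
    rw [show (l.filter (fun p => p.2 == y)) = (l.filter (fun p => p.2 == y)).map id from
      (List.map_id _).symm]
    rw [List.map_map]
    apply List.map_congr_left
    intro p hp
    have hy : p.2 = y := by simpa using (List.mem_filter.mp hp).2
    simp [Function.comp, hy, Prod.ext_iff]
  rwa [h2] at h1

theorem partition_perm (ks : List Int) (l : List (Int × Int))
    (hnd : ks.Nodup) (hcov : ∀ p ∈ l, p.2 ∈ ks) :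
    (ks.flatMap (fun y => l.filter (fun p => p.2 == y))).Perm l := by
  induction ks generalizing l with
  | nil =>
    have : l = [] := by
      cases l with
      | nil => rfl
      | cons p t => exact absurd (hcov p (by simp)) (by simp)
    simp [this]
  | cons k ks ih =>
    rw [List.flatMap_cons]
    have hrw : ks.flatMap (fun y => l.filter (fun p => p.2 == y)) =
        ks.flatMap (fun y => (l.filter (fun p => !(p.2 == k))).filter (fun p => p.2 == y)) := by
      apply List.flatMap_congr
      intro y hy
      rw [List.filter_filter]
      apply List.filter_congr
      intro p _
      have hk : k ∉ ks := (List.nodup_cons.mp hnd).1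
      by_cases hpy : p.2 = y
      · have hyk : y ≠ k := fun h => hk (h ▸ hy)
        simp [hpy, hyk]
      · simp [hpy]
    rw [hrw]
    have hcov' : ∀ p ∈ l.filter (fun p => !(p.2 == k)), p.2 ∈ ks := by
      intro p hp
      rcases List.mem_filter.mp hp with ⟨hpl, hne⟩
      rcases List.mem_cons.mp (hcov p hpl) with h | h
      · simp [h] at hne
      · exact h
    have := ih (l.filter (fun p => !(p.2 == k))) (List.nodup_cons.mp hnd).2 hcov'
    exact (List.Perm.append_left _ this).trans (List.filter_append_perm _ l)

theorem rowsOf_nodup (l : List (Int × Int)) : (rowsOf l).Nodup :=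
  ((PySem.List.sorted_perm _ _ _).nodup_iff).mpr (PySem.Set.nodup_ofList _)

theorem mem_rowsOf {l : List (Int × Int)} {p : Int × Int} (h : p ∈ l) : p.2 ∈ rowsOf l := by
  rw [rowsOf, PySem.List.mem_sorted, PySem.Set.mem_ofList]
  exact List.mem_map.mpr ⟨p, h, rfl⟩

theorem rows_flatMap_eq_sorted2 (l : List (Int × Int)) :
    (rowsOf l).flatMap (rowList l) = PySem.List.sorted2 l (fun p => p.2) (fun p => p.1) false := by
  apply PySem.List.eq_of_perm_of_pairwise_le_of_injective keyLex keyLex_injective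
  · have h1 : ((rowsOf l).flatMap (rowList l)).Perm
        ((rowsOf l).flatMap (fun y => l.filter (fun p => p.2 == y))) :=
      List.Perm.flatMap (List.Perm.refl _) (fun y _ => rowList_perm_filter l y)
    exact (h1.trans (partition_perm _ l (rowsOf_nodup l) (fun p hp => mem_rowsOf hp))).trans
      (PySem.List.sorted2_perm l _ _ false).symm
  · rw [List.pairwise_flatMap]
    constructor
    · intro y _
      rw [rowList, List.pairwise_map]
      have := PySem.List.sorted_pairwise ((l.filter (fun p => p.2 == y)).map (fun p => p.1)) (fun x => x)
      exact this.imp (by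
        intro a b hab
        simp [keyLex, Prod.Lex.toLex_le_toLex]
        omega)
    · have := PySem.List.sorted_ofList_pairwise_lt (l.map (fun p => p.2))
      refine this.imp ?_
      intro y1 y2 h12 p hp q hq
      have := snd_of_mem_rowList hp
      have := snd_of_mem_rowList hq
      simp [keyLex, Prod.Lex.toLex_le_toLex]
      omega
  · exact pairwise_sorted2_lex l

theorem takeWhile_all_append {α : Type} (P : α → Bool) (ps rest : List α)
    (h1 : ∀ q ∈ ps, P q = true) (h2 : ∀ q ∈ rest, P q = false) :
    (ps ++ rest).takeWhile P = ps ∧ (ps ++ rest).dropWhile P = rest := by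
  induction ps with
  | nil =>
    simp only [List.nil_append]
    cases rest with
    | nil => simp
    | cons q t => simp [h2 q (by simp)]
  | cons p ps ih =>
    have hp := h1 p (by simp)
    have := ih (fun q hq => h1 q (by simp [hq]))
    simp [hp, this.1, this.2]

theorem snakeBlocks_flatMap (rows : List Int) (f : Int → List (Int × Int)) (r : Nat)
    (hne : ∀ y ∈ rows, f y ≠ [])
    (hconst : ∀ y ∈ rows, ∀ p ∈ f y, p.2 = y)
    (hnd : rows.Pairwise (fun a b => a ≠ b)) :
    snakeBlocks r (rows.flatMap f) = snakeRows r rows f := by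
  induction rows generalizing r with
  | nil => simp [snakeBlocks, snakeRows]
  | cons y t ih =>
    rcases List.pairwise_cons.mp hnd with ⟨hyt, hnd'⟩
    obtain ⟨p, ps, hfy⟩ : ∃ p ps, f y = p :: ps := by
      cases h : f y with
      | nil => exact absurd h (hne y (by simp))
      | cons a b => exact ⟨a, b, rfl⟩
    have hpy : p.2 = y := hconst y (by simp) p (by simp [hfy])
    have hps : ∀ q ∈ ps, (fun q => q.2 == p.2) q = true := by
      intro q hq
      have := hconst y (by simp) q (by simp [hfy, hq])
      simp [this, hpy]
    have hrest : ∀ q ∈ t.flatMap f, (fun q => q.2 == p.2) q = false := by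
      intro q hq
      rcases List.mem_flatMap.mp hq with ⟨y', hy', hqy'⟩
      have := hconst y' (by simp [hy']) q hqy'
      have hne' : y' ≠ y := fun h => hyt y' hy' h.symm
      simp [this, hpy, hne']
    have hsplit := takeWhile_all_append (fun q => q.2 == p.2) ps (t.flatMap f) hps hrest
    rw [List.flatMap_cons, hfy, List.cons_append, snakeBlocks]
    rw [hsplit.1, hsplit.2, ih (r + 1) (fun y h => hne y (List.mem_cons_of_mem _ h))
      (fun y h => hconst y (List.mem_cons_of_mem _ h)) hnd', ← hfy, snakeRows]

-- the grouping dict: lookups are per-row filters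
theorem groups_getD (l : List (Int × Int)) (y : Int) :
    PySem.Dict.getD (l.foldl (fun d p => d.modify p.2 [] (fun xs => xs ++ [p.1]))
        PySem.Dict.empty) y []
      = (l.filter (fun p => p.2 == y)).map (fun p => p.1) := by
  have h : l.foldl (fun d p => d.modify p.2 [] (fun xs => xs ++ [p.1])) PySem.Dict.empty
      = (l.map (fun p => (p.2, p.1))).foldl (fun d q => d.modify q.1 [] (fun xs => xs ++ [q.2]))
        PySem.Dict.empty := by
    rw [List.foldl_map]
  rw [h, PySem.Dict.getD_foldl_modify_append]
  simp [List.filter_map, List.map_map, Function.comp_def]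

theorem groups_keys (l : List (Int × Int)) :
    PySem.Dict.keys (l.foldl (fun d p => d.modify p.2 [] (fun xs => xs ++ [p.1]))
        PySem.Dict.empty)
      = PySem.Set.ofList (l.map (fun p => p.2)) := by
  rw [PySem.Dict.keys_foldl_modify_key]
  simp [PySem.Set.update, PySem.Set.ofList_eq_foldl, PySem.Dict.keys_empty]

-- A's enumerate loop is snakeRows
theorem foldl_enum_snake (l : List (Int × Int)) (ys : List Int) (n : Nat) (acc : List (Int × Int)) :
    (PySem.List.enumerate ys (n : Int)).foldl
      (fun result iy =>
        result ++ (if iy.1 % 2 == 0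
          then PySem.List.sorted ((l.filter (fun p => p.2 == iy.2)).map (fun p => p.1)) (fun x => x) false
          else PySem.List.sorted ((l.filter (fun p => p.2 == iy.2)).map (fun p => p.1)) (fun x => x) true).map
            (fun x => (x, iy.2))) acc
    = acc ++ snakeRows n ys (rowList l) := by
  induction ys generalizing n acc with
  | nil => simp [snakeRows, PySem.List.enumerate]
  | cons y t ih =>
    rw [PySem.List.enumerate_cons, List.foldl_cons, snakeRows]
    have hcast : ((n : Int) + 1) = ((n + 1 : Nat) : Int) := by push_cast; ring
    rw [hcast, ih]
    by_cases hpar : n % 2 = 1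
    · have h2 : ((n : Int) % 2 == 0) = false := by
        simp only [beq_eq_false_iff_ne]; omega
      simp [h2, hpar, sorted_rev_eq_reverse, rowList, List.map_reverse, List.append_assoc]
    · have h2 : ((n : Int) % 2 == 0) = true := by
        simp only [beq_iff_eq]; omega
      have h3 : (n % 2 == 1) = false := by simp only [beq_eq_false_iff_ne]; omega
      simp [h2, h3, rowList, List.append_assoc]

theorem a_eq_snakeRows (l : List (Int × Int)) :
    snake_sort l = snakeRows 0 (rowsOf l) (rowList l) := by
  by_cases hl : l = []
  · subst hl; rfl
  · rw [snake_sort, if_neg hl]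
    simp only [groups_keys, groups_getD]
    have := foldl_enum_snake l (rowsOf l) 0 []
    simpa [rowsOf] using this

theorem rowList_ne_nil {l : List (Int × Int)} {y : Int} (hy : y ∈ rowsOf l) :
    rowList l y ≠ [] := by
  rw [rowsOf, PySem.List.mem_sorted, PySem.Set.mem_ofList] at hy
  rcases List.mem_map.mp hy with ⟨p, hpl, hpy⟩
  intro h
  rw [rowList] at h
  rcases List.map_eq_nil_iff.mp h with h
  have := (PySem.List.sorted_eq_nil_iff _ _ _).mp h
  rcases List.map_eq_nil_iff.mp this with h2
  have : p ∈ l.filter (fun p => p.2 == y) := List.mem_filter.mpr ⟨hpl, by simp [hpy]⟩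
  simp [h2] at this

theorem b_eq_snakeRows (l : List (Int × Int)) :
    snake_sort_alt l = snakeRows 0 (rowsOf l) (rowList l) := by
  rw [snake_sort_alt, ← rows_flatMap_eq_sorted2]
  exact snakeBlocks_flatMap (rowsOf l) (rowList l) 0
    (fun y hy => rowList_ne_nil hy)
    (fun y _ p hp => snd_of_mem_rowList hp)
    (rowsOf_nodup l)

-- ===== VERDICT (by name: the statement is the Claim_ definition above) =====
theorem snake_sort_spec : Claim_equal_snake_sort := by
  intro l _
  show snake_sort l = snake_sort_alt l
  rw [a_eq_snakeRows, b_eq_snakeRows]
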